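-- pv_equiv track=rewrite | github.com/Abdulhameed556/rd_sharma_question_extractor.O | src/question_extractor/latex_converter.py | generate_markdown_with_latex
-- ===== SOURCE A (Python) =====
-- from typing import List, Dict, Any, Optional, Tuple
--
-- def generate_markdown_with_latex(questions: List[Dict[str, Any]],
--                                chapter: int, topic: str, topic_name: str) -> str:
--     """
--     Generate Markdown with LaTeX for rendering.
--
--     Args:
--         questions: List of question dictionaries
--         chapter: Chapter number
--         topic: Topic identifier
--         topic_name: Topic name
--
--     Returns:
--         Markdown content with LaTeX
--     """
--     markdown = f"# Chapter {chapter}: {topic_name}\n\n"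
--     markdown += f"**Topic:** {topic}\n\n"
--     markdown += f"**Total Questions:** {len(questions)}\n\n"
--
--     if not questions:
--         markdown += "*No questions found for this topic.*\n\n"
--         return markdown
--
--     # Group by source
--     questions_by_source = {}
--     for question in questions:
--         source = question.get("source", "Unknown")
--         if source not in questions_by_source:
--             questions_by_source[source] = []
--         questions_by_source[source].append(question)
--
--     # Generate sections
--     for source, source_questions in questions_by_source.items():
--         markdown += f"## {source}\n\n"
--
--         for i, question in enumerate(source_questions, 1):
--             question_text = question.get("question_text", "")
--             question_number = question.get("question_number", str(i))
--
--             markdown += f"**{question_number}.** {question_text}\n\n"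
--
--     return markdown
-- ===== SOURCE B (Python) =====
-- def _sections(qs):
--     # Recursive partition: peel off the first question's source-group, recurse on the rest.
--     if not qs:
--         return ""
--     src = qs[0].get("source", "Unknown")
--     group = [q for q in qs if q.get("source", "Unknown") == src]
--     rest = [q for q in qs if q.get("source", "Unknown") != src]
--     body = "".join(
--         f"**{q.get('question_number', str(i))}.** {q.get('question_text', '')}\n\n"
--         for i, q in enumerate(group, 1))
--     return f"## {src}\n\n" + body + _sections(rest)
--
--
-- def generate_markdown_with_latex(questions, chapter, topic, topic_name):
--     header = (f"# Chapter {chapter}: {topic_name}\n\n"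
--               f"**Topic:** {topic}\n\n"
--               f"**Total Questions:** {len(questions)}\n\n")
--     if not questions:
--         return header + "*No questions found for this topic.*\n\n"
--     return header + _sections(questions)
-- ===== Notes on version B (the rewrite author's own statement) =====
-- stated objective: alternative
-- what changed: Replaces A's dict-of-lists grouping plus accumulating render loops by a recursive partition: peel off the first question's source, split the list into that group and the remainder, join the group's lines, and recurse on the remainder.
import Mathlib
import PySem

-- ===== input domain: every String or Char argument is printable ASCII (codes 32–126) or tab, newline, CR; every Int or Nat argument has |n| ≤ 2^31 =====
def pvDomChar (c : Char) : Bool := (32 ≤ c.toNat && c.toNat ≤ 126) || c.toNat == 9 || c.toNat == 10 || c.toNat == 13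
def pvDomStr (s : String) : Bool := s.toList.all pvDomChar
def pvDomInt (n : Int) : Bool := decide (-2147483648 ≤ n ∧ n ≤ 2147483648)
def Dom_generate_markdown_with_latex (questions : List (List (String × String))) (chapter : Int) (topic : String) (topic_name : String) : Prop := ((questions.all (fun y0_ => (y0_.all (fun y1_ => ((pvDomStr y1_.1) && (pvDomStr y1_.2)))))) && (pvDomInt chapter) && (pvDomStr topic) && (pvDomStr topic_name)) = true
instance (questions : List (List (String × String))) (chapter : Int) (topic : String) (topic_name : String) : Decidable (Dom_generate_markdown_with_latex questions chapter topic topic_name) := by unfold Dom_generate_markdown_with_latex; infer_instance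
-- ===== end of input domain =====

-- B replaces A's dict-of-lists grouping plus accumulating render loops by a recursive
-- partition on the question list (peel off the first source's group, join its lines,
-- recurse on the remainder); same output, no speed claim.

-- q.get(key, default) on a question dict (assoc list, first match)
def qget (q : List (String × String)) (k d : String) : String :=
  PySem.Dict.getD (PySem.Dict.mk q) k d

-- the report header, common to both ports
def mdHeader (questions : List (List (String × String))) (chapter : Int) (topic : String) (topic_name : String) : String :=
  "# Chapter " ++ PySem.Int.toStr chapter ++ ": " ++ topic_name ++ "\n\n" ++
  "**Topic:** " ++ topic ++ "\n\n" ++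
  "**Total Questions:** " ++ PySem.Int.toStr (questions.length : Int) ++ "\n\n"

-- ===== PORT A =====
def generate_markdown_with_latex (questions : List (List (String × String))) (chapter : Int) (topic : String) (topic_name : String) : String :=
  let markdown := mdHeader questions chapter topic topic_name
  if questions = [] then
    markdown ++ "*No questions found for this topic.*\n\n"
  else
    -- Group by source
    let questions_by_source : PySem.Dict String (List (List (String × String))) :=
      questions.foldl (fun d question =>
        let source := qget question "source" "Unknown"
        let d := if d.contains source then d else d.insert source []
        d.insert source (d.getD source [] ++ [question])) PySem.Dict.empty
    -- Generate sections
    questions_by_source.items.foldl (fun md p =>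
      let md := md ++ "## " ++ p.1 ++ "\n\n"
      (PySem.List.enumerate p.2 1).foldl (fun md iq =>
        md ++ "**" ++ qget iq.2 "question_number" (PySem.Int.toStr iq.1) ++ ".** " ++
        qget iq.2 "question_text" "" ++ "\n\n") md) markdown

-- ===== PORT B =====
-- "".join(parts), ported by hand (empty separator): plain concatenation of the list
def concatS : List String → String
  | [] => ""
  | s :: r => s ++ concatS r

-- one rendered question line
def mdLine (i : Int) (q : List (String × String)) : String :=
  "**" ++ qget q "question_number" (PySem.Int.toStr i) ++ ".** " ++
  qget q "question_text" "" ++ "\n\n"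

-- recursive partition over the question list: first source's section, then the rest
def sectionsB : List (List (String × String)) → String
  | [] => ""
  | q :: rest0 =>
    let src := qget q "source" "Unknown"
    let group := (q :: rest0).filter (fun x => qget x "source" "Unknown" == src)
    let rest := (q :: rest0).filter (fun x => !(qget x "source" "Unknown" == src))
    "## " ++ src ++ "\n\n" ++
      concatS ((PySem.List.enumerate group 1).map (fun p => mdLine p.1 p.2)) ++
      sectionsB rest
  termination_by qs => qs.length
  decreasing_by
    simp only [List.filter]
    simp
    exact List.length_filter_le _ _

def generate_markdown_with_latex_alt (questions : List (List (String × String))) (chapter : Int) (topic : String) (topic_name : String) : String :=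
  let header := mdHeader questions chapter topic topic_name
  if questions = [] then
    header ++ "*No questions found for this topic.*\n\n"
  else
    header ++ sectionsB questions

-- ===== PRECONDITION & SPEC =====
def Spec_generate_markdown_with_latex (questions : List (List (String × String))) (chapter : Int) (topic : String) (topic_name : String) (out : String) : Prop := out = generate_markdown_with_latex_alt questions chapter topic topic_name
instance (questions : List (List (String × String))) (chapter : Int) (topic : String) (topic_name : String) (out : String) : Decidable (Spec_generate_markdown_with_latex questions chapter topic topic_name out) := by unfold Spec_generate_markdown_with_latex; infer_instance

-- ===== CLAIM (what is proved, stated in full; the proofs are below) =====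
def Claim_equal_generate_markdown_with_latex : Prop := ∀ (questions : List (List (String × String))) (chapter : Int) (topic : String) (topic_name : String), Dom_generate_markdown_with_latex questions chapter topic topic_name → Spec_generate_markdown_with_latex questions chapter topic topic_name (generate_markdown_with_latex questions chapter topic topic_name)

-- ===== LEMMAS AND PROOFS =====

-- f q = the source key of a question
def srcOf (q : List (String × String)) : String := qget q "source" "Unknown"

-- the rendered section for one source, relative to a fixed question list
def sect (qs : List (List (String × String))) (s : String) : String :=
  "## " ++ s ++ "\n\n" ++
    concatS ((PySem.List.enumerate (qs.filter (fun q => srcOf q == s)) 1).map (fun p => mdLine p.1 p.2))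

-- the body of A's grouping loop, named so the invariant can speak about it
def stepA (d : PySem.Dict String (List (List (String × String)))) (question : List (String × String)) : PySem.Dict String (List (List (String × String))) :=
  let source := qget question "source" "Unknown"
  let d := if d.contains source then d else d.insert source []
  d.insert source (d.getD source [] ++ [question])

lemma dedup_append_singleton (l : List String) (a : String) :
    PySem.List.dedup (l ++ [a]) = if a ∈ l then PySem.List.dedup l else PySem.List.dedup l ++ [a] := by
  simp only [PySem.List.dedup_eq_ofList, PySem.Set.ofList_eq_foldl, List.foldl_append, List.foldl_cons, List.foldl_nil]
  rw [← PySem.Set.ofList_eq_foldl]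
  simp [PySem.Set.add, PySem.Set.contains]

-- A's grouping dict, characterised: its items are exactly the (source, filtered group) pairs,
-- in first-appearance order; contains/getD invariants carry the induction.
lemma group_invariant (qs : List (List (String × String))) :
    (qs.foldl stepA PySem.Dict.empty).items
      = (PySem.List.dedup (qs.map srcOf)).map
          (fun s => (s, qs.filter (fun q => srcOf q == s)))
    ∧ (∀ t, (qs.foldl stepA PySem.Dict.empty).contains t
          = (qs.map srcOf).contains t)
    ∧ (∀ t, (qs.foldl stepA PySem.Dict.empty).getD t []
          = qs.filter (fun q => srcOf q == t)) := by
  induction qs using List.reverseRecOn with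
  | nil => exact ⟨rfl, fun t => rfl, fun t => rfl⟩
  | append_singleton qs x IH =>
    obtain ⟨hItems, hContains, hGetD⟩ := IH
    set d := qs.foldl stepA PySem.Dict.empty with hd
    rw [List.foldl_append]
    simp only [List.foldl_cons, List.foldl_nil, List.map_append, List.filter_append]
    set s := qget x "source" "Unknown" with hs
    have hsS : srcOf x = s := rfl
    have hsx : List.map srcOf [x] = [s] := rfl
    have hfx : ∀ t : String, List.filter (fun q => srcOf q == t) [x]
        = if t = s then [x] else [] := by
      intro t
      by_cases hts : t = s
      · subst hts; simp [List.filter, srcOf, ← hs]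
      · rw [if_neg hts]; simp [List.filter, srcOf, ← hs, beq_eq_false_iff_ne.mpr (Ne.symm hts)]
    rw [hsx, dedup_append_singleton]
    by_cases hmem : s ∈ List.map srcOf qs
    · have hc : d.contains s = true := by rw [hContains]; simpa using hmem
      have hstep : stepA d x = d.insert s (d.getD s [] ++ [x]) := by
        simp [stepA, ← hs, hc]
      rw [hstep, if_pos hmem]
      refine ⟨?_, ?_, ?_⟩
      · rw [PySem.Dict.items_insert, hc, if_pos rfl, hItems, List.map_map]
        apply List.map_congr_left
        intro t _
        by_cases hts : t = s
        · subst hts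
          simp [Function.comp, hGetD s, hfx s]
        · simp [Function.comp, hts, hfx t]
      · intro t
        rw [PySem.Dict.contains_insert, hContains]
        by_cases hts : t = s <;> simp [hts]
      · intro t
        rw [PySem.Dict.getD_insert, hfx t]
        by_cases hts : t = s
        · subst hts; simp [hGetD s]
        · simp [hts, hGetD t]
    · have hc : d.contains s = false := by
        rw [hContains]; simpa using hmem
      have hstep : stepA d x = (d.insert s []).insert s [x] := by
        simp [stepA, ← hs, hc, PySem.Dict.getD_insert_self]
      rw [hstep, if_neg hmem]
      have hc2 : (d.insert s []).contains s = true := PySem.Dict.contains_insert_self _ _ _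
      have hnotqs : ∀ q ∈ qs, ¬ (srcOf q == s) = true := by
        intro q hq h
        exact hmem (List.mem_map.2 ⟨q, hq, by simpa using h⟩)
      have hfilnil : List.filter (fun q => srcOf q == s) qs = [] :=
        List.filter_eq_nil_iff.2 hnotqs
      refine ⟨?_, ?_, ?_⟩
      · rw [PySem.Dict.items_insert, hc2, if_pos rfl,
            PySem.Dict.items_insert, hc, if_neg (by simp), hItems]
        rw [List.map_append, List.map_map, List.map_append]
        congr 1
        · apply List.map_congr_left
          intro t ht
          have htqs : t ∈ List.map srcOf qs :=
            (PySem.List.mem_dedup _ _).1 ht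
          have hts : ¬ t = s := fun h => hmem (h ▸ htqs)
          simp [Function.comp, hts, hfx t]
        · simp [hfilnil, hfx s]
      · intro t
        rw [PySem.Dict.contains_insert, PySem.Dict.contains_insert, hContains]
        by_cases hts : t = s <;> simp [hts]
      · intro t
        rw [PySem.Dict.getD_insert, PySem.Dict.getD_insert, hfx t]
        by_cases hts : t = s
        · subst hts; simp [hfilnil]
        · simp [hts, hGetD t]

-- accumulating string fold = prefix ++ plain concatenation
lemma foldl_str {α : Type} (g : α → String) (L : List α) (init : String) :
    L.foldl (fun md x => md ++ g x) init = init ++ concatS (L.map g) := by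
  induction L generalizing init with
  | nil => simp [concatS]
  | cons a L IH => simp [concatS, IH, String.append_assoc]

-- dedup peels its head and removes later duplicates of it
lemma dedup_cons_filter (a : String) (l : List String) :
    PySem.List.dedup (a :: l) = a :: PySem.List.dedup (l.filter (fun x => !(x == a))) := by
  have aux : ∀ (l : List String) (acc : List String),
      l.foldl PySem.Set.add (a :: acc) = a :: (l.filter (fun x => !(x == a))).foldl PySem.Set.add acc := by
    intro l
    induction l with
    | nil => intro acc; simp
    | cons x l IH =>
      intro acc
      by_cases hxa : x = a
      · have h1 : PySem.Set.add (a :: acc) x = a :: acc := by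
          simp [PySem.Set.add, PySem.Set.contains, hxa]
        simp [hxa, IH]
      · have h2 : PySem.Set.add (a :: acc) x = a :: PySem.Set.add acc x := by
          simp [PySem.Set.add, PySem.Set.contains, hxa]
          split <;> rfl
        have h3 : (!(x == a)) = true := by simpa using hxa
        simp only [List.foldl_cons, h2, List.filter_cons, h3, if_pos trivial, IH]
  simp only [PySem.List.dedup_eq_ofList, PySem.Set.ofList_eq_foldl, List.foldl_cons]
  have h0 : PySem.Set.add ([] : List String) a = a :: [] := rfl
  rw [h0, aux]

-- filter by source commutes with mapping to sources
lemma map_srcOf_filter (l : List (List (String × String))) (s : String) :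
    (l.filter (fun x => !(srcOf x == s))).map srcOf
      = (l.map srcOf).filter (fun x => !(x == s)) := by
  induction l with
  | nil => rfl
  | cons y t IHt =>
    by_cases hy : (srcOf y == s) = true <;>
      simp [List.map, hy, IHt]

-- B's recursion, characterised as the concatenation of per-source sections
lemma sectionsB_eq (qs : List (List (String × String))) :
    sectionsB qs = concatS ((PySem.List.dedup (qs.map srcOf)).map (sect qs)) := by
  induction qs using sectionsB.induct with
  | case1 => simp [sectionsB, concatS]
  | case2 q rest0 src rest IH =>
    have hsrcdef : src = qget q "source" "Unknown" := rfl
    have hrestdef : rest = (q :: rest0).filter (fun x => !(qget x "source" "Unknown" == src)) := rfl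
    have hhead : (qget q "source" "Unknown" == src) = true := by rw [hsrcdef]; simp
    have hrest : rest = rest0.filter (fun x => !(srcOf x == src)) := by
      rw [hrestdef, List.filter_cons]
      simp only [hhead, Bool.not_true, if_neg (by simp : ¬ (false = true))]
      rfl
    have hmapf : rest.map srcOf = (rest0.map srcOf).filter (fun x => !(x == src)) := by
      rw [hrest]; exact map_srcOf_filter rest0 src
    simp only [sectionsB]
    rw [show (q :: rest0).filter (fun x => !(qget x "source" "Unknown" == src)) = rest from hrestdef.symm,
        IH, hmapf]
    rw [show (q :: rest0).map srcOf = src :: rest0.map srcOf by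
          simp [List.map_cons]; exact hsrcdef.symm,
        dedup_cons_filter]
    have hmapeq : (PySem.List.dedup ((rest0.map srcOf).filter (fun x => !(x == src)))).map (sect rest)
        = (PySem.List.dedup ((rest0.map srcOf).filter (fun x => !(x == src)))).map (sect (q :: rest0)) := by
      apply List.map_congr_left
      intro t ht
      have htne : (t == src) = false := by
        have h1 := (PySem.List.mem_dedup _ _).1 ht
        have h2 := List.of_mem_filter h1
        simpa using h2
      have htns : ¬ src = t := fun h => by simp [h] at htne
      have hfil : rest.filter (fun x => srcOf x == t) = (q :: rest0).filter (fun x => srcOf x == t) := by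
        rw [hrest, List.filter_filter, List.filter_cons]
        have hqf : (srcOf q == t) = false := by
          have : srcOf q = src := rfl
          rw [this]; exact beq_eq_false_iff_ne.mpr htns
        rw [hqf]
        simp only [Bool.false_eq_true]
        apply List.filter_congr
        intro x _
        by_cases hx : (srcOf x == t) = true
        · have hxt : srcOf x = t := by simpa using hx
          simp [hxt, htne]
        · have hxf : (srcOf x == t) = false := by simpa using hx
          simp [hxf]
      unfold sect
      rw [hfil]
    rw [hmapeq, List.map_cons]
    rw [show concatS (sect (q :: rest0) src :: (PySem.List.dedup ((rest0.map srcOf).filter (fun x => !(x == src)))).map (sect (q :: rest0)))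
          = sect (q :: rest0) src ++ concatS ((PySem.List.dedup ((rest0.map srcOf).filter (fun x => !(x == src)))).map (sect (q :: rest0))) from rfl]
    rw [show sect (q :: rest0) src = "## " ++ src ++ "\n\n" ++
        concatS ((PySem.List.enumerate ((q :: rest0).filter (fun x => qget x "source" "Unknown" == src)) 1).map (fun p => mdLine p.1 p.2)) from rfl]

theorem equal_statement : ∀ (questions : List (List (String × String))) (chapter : Int) (topic : String) (topic_name : String),
    generate_markdown_with_latex questions chapter topic topic_name
      = generate_markdown_with_latex_alt questions chapter topic topic_name := by
  intro questions chapter topic topic_name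
  unfold generate_markdown_with_latex generate_markdown_with_latex_alt
  by_cases hq : questions = []
  · simp [hq]
  · simp only [if_neg hq]
    rw [show (fun (d : PySem.Dict String (List (List (String × String)))) (question : List (String × String)) =>
        let source := qget question "source" "Unknown"
        let d := if d.contains source then d else d.insert source []
        d.insert source (d.getD source [] ++ [question])) = stepA from rfl]
    rw [(group_invariant questions).1, sectionsB_eq]
    rw [show (fun (md : String) (p : String × List (List (String × String))) =>
        let md := md ++ "## " ++ p.1 ++ "\n\n"
        (PySem.List.enumerate p.2 1).foldl (fun md iq =>
          md ++ "**" ++ qget iq.2 "question_number" (PySem.Int.toStr iq.1) ++ ".** " ++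
          qget iq.2 "question_text" "" ++ "\n\n") md)
      = (fun md p => md ++ ("## " ++ p.1 ++ "\n\n" ++
          concatS ((PySem.List.enumerate p.2 1).map (fun iq => mdLine iq.1 iq.2)))) from ?_]
    · rw [foldl_str, List.map_map]
      congr 1
    · funext md p
      rw [show (fun (md : String) (iq : Int × List (String × String)) =>
          md ++ "**" ++ qget iq.2 "question_number" (PySem.Int.toStr iq.1) ++ ".** " ++
          qget iq.2 "question_text" "" ++ "\n\n")
        = (fun md iq => md ++ mdLine iq.1 iq.2) from by funext md iq; simp [mdLine, String.append_assoc]]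
      rw [foldl_str]
      simp [String.append_assoc]

-- ===== VERDICT (by name: the statement is the Claim_ definition above) =====
theorem generate_markdown_with_latex_spec : Claim_equal_generate_markdown_with_latex := by
  intro questions chapter topic topic_name _
  exact equal_statement questions chapter topic topic_name
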